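-- pv_equiv track=rewrite | github.com/rororo33/Network | ip_fragmentation_calculation.py | calculate_ip_fragmentation
-- ===== SOURCE A (Python) =====
-- def calculate_ip_fragmentation(total_length, mtu):
--     """
--     IP 프래그먼테이션 계산
--
--     Args:
--         total_length: 원본 IP 패킷의 총 길이 (바이트)
--         mtu: Maximum Transmission Unit (바이트)
--
--     Returns:
--         각 프래그먼트의 세부 정보 (length, ID, fragflag, offset)
--     """
--     # IP 헤더 크기 (기본 20바이트, 옵션 없음 가정)
--     ip_header_size = 20
--
--     # 각 프래그먼트에서 데이터가 차지할 수 있는 최대 크기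
--     # MTU에서 IP 헤더 크기를 뺀 값
--     max_data_per_fragment = mtu - ip_header_size
--
--     # 8의 배수로 데이터 크기 조정 (IP 프래그먼테이션 요구사항)
--     max_data_per_fragment = (max_data_per_fragment // 8) * 8
--
--     # 원본 데이터 크기 (IP 헤더 제외)
--     original_data_size = total_length - ip_header_size
--
--     # 필요한 프래그먼트 수 계산
--     num_fragments = (original_data_size + max_data_per_fragment - 1) // max_data_per_fragment
--
--     # 각 프래그먼트의 세부 정보 계산
--     fragments = []
--     remaining_data = original_data_size
--     offset = 0
--
--     # 임의의 ID 값 (실제로는 원본 패킷마다 고유한 값)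
--     id_value = 12345
--
--     for i in range(num_fragments):
--         # 마지막 프래그먼트인지 확인
--         is_last_fragment = (i == num_fragments - 1)
--
--         # 현재 프래그먼트의 데이터 크기
--         data_size = min(max_data_per_fragment, remaining_data)
--
--         # 프래그먼트의 총 길이 (IP 헤더 + 데이터)
--         fragment_length = ip_header_size + data_size
--
--         # 프래그먼트 플래그 (0: 마지막 프래그먼트, 1: 더 프래그먼트가 있음)
--         frag_flag = 0 if is_last_fragment else 1
--
--         # 프래그먼트 오프셋 (8바이트 단위)
--         frag_offset = offset // 8
--
--         fragments.append({
--             'fragment_number': i + 1,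
--             'length': fragment_length,
--             'id': id_value,
--             'fragflag': frag_flag,
--             'offset': frag_offset,
--             'data_size': data_size
--         })
--
--         # 다음 프래그먼트를 위한 값 업데이트
--         remaining_data -= data_size
--         offset += data_size
--
--     return fragments
-- ===== SOURCE B (Python) =====
-- def calculate_ip_fragmentation(total_length, mtu):
--     ip_header_size = 20
--     max_data = ((mtu - ip_header_size) // 8) * 8
--     original_data_size = total_length - ip_header_size
--     num_fragments = (original_data_size + max_data - 1) // max_data
--     # Build the fragment list BACK TO FRONT: walk the data from its end,
--     # prepending each fragment; the first fragment prepended is the last one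
--     # on the wire (nothing built yet => fragflag 0), every later prepend
--     # carries fragflag 1.
--     fragments = []
--     start = num_fragments * max_data
--     number = num_fragments
--     while number > 0:
--         start -= max_data
--         data_size = min(max_data, original_data_size - start)
--         fragments.insert(0, {
--             'fragment_number': number,
--             'length': ip_header_size + data_size,
--             'id': 12345,
--             'fragflag': 1 if fragments else 0,
--             'offset': start // 8,
--             'data_size': data_size,
--         })
--         number -= 1
--     return fragments
-- ===== Notes on version B (the rewrite author's own statement) =====
-- stated objective: alternative
-- what changed: B builds the fragment list back-to-front: it walks the payload from its end, prepending each fragment and deriving the more-fragments flag from whether anything has been built yet, instead of A's forward loop threading remaining_data/offset accumulators and testing the index against num_fragments-1.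
-- outside the precondition, e.g. on calculate_ip_fragmentation(100, 25): A raises ZeroDivisionError, B raises ZeroDivisionError
import Mathlib
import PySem

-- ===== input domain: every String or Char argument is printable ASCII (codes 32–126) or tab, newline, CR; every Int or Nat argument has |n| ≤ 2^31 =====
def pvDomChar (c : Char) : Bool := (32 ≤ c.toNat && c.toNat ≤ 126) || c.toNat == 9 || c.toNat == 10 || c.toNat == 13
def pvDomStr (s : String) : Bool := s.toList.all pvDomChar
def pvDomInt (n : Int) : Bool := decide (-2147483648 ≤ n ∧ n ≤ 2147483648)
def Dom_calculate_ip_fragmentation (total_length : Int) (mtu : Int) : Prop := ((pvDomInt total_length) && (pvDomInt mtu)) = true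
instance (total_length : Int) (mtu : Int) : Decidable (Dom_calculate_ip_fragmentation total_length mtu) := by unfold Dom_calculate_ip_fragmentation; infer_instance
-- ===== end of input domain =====

-- B builds the fragment list back-to-front (prepending from the end of the payload,
-- flag from what is already built) instead of A's forward accumulator loop (objective: alternative).


-- ===== PORT A =====
def calculate_ip_fragmentation (total_length : Int) (mtu : Int) : List (List (String × Int)) :=
  let ip_header_size : Int := 20
  let max_data_per_fragment := mtu - ip_header_size
  let max_data_per_fragment := (PySem.Int.floordiv max_data_per_fragment 8) * 8
  let original_data_size := total_length - ip_header_size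
  let num_fragments := PySem.Int.floordiv (original_data_size + max_data_per_fragment - 1) max_data_per_fragment
  let id_value : Int := 12345
  let st := (PySem.List.pyRange 0 num_fragments 1).foldl
    (fun (st : List (List (String × Int)) × Int × Int) i =>
      let fragments := st.1
      let remaining_data := st.2.1
      let offset := st.2.2
      let is_last_fragment := i == num_fragments - 1
      let data_size := min max_data_per_fragment remaining_data
      let fragment_length := ip_header_size + data_size
      let frag_flag : Int := if is_last_fragment then 0 else 1
      let frag_offset := PySem.Int.floordiv offset 8
      (fragments ++ [[("fragment_number", i + 1), ("length", fragment_length),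
                      ("id", id_value), ("fragflag", frag_flag),
                      ("offset", frag_offset), ("data_size", data_size)]],
       remaining_data - data_size, offset + data_size))
    ([], original_data_size, 0)
  st.1

-- ===== PORT B =====
-- B's while loop (number counts down num_fragments..1), as recursion on the
-- iteration count; fuel = num_fragments.toNat equals the number of iterations.
def pvBuildB (m ods : Int) :
    Nat → Int → Int → List (List (String × Int)) → List (List (String × Int))
  | 0, _, _, fragments => fragments
  | fuel + 1, start, number, fragments =>
    if 0 < number then
      let start' := start - m
      let data_size := min m (ods - start')
      pvBuildB m ods fuel start' (number - 1)
        ([("fragment_number", number), ("length", 20 + data_size),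
          ("id", (12345 : Int)),
          ("fragflag", if fragments.isEmpty then (0 : Int) else 1),
          ("offset", PySem.Int.floordiv start' 8), ("data_size", data_size)] :: fragments)
    else fragments

def calculate_ip_fragmentation_alt (total_length : Int) (mtu : Int) : List (List (String × Int)) :=
  let ip_header_size : Int := 20
  let max_data := (PySem.Int.floordiv (mtu - ip_header_size) 8) * 8
  let original_data_size := total_length - ip_header_size
  let num_fragments := PySem.Int.floordiv (original_data_size + max_data - 1) max_data
  pvBuildB max_data original_data_size num_fragments.toNat
    (num_fragments * max_data) num_fragments []

-- ===== PRECONDITION & SPEC =====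
-- Pre_ excludes mtu in [20,27], where the 8-byte-aligned payload capacity is zero and A
-- raises ZeroDivisionError (B raises there too), and the degenerate corner mtu ≤ 19 with
-- total_length - 20 below that (negative) capacity, where A's remaining/offset accumulators
-- produce accidental negative-size fragments whose offsets B does not reproduce.
def Pre_calculate_ip_fragmentation (total_length : Int) (mtu : Int) : Prop :=
  ¬ (20 ≤ mtu ∧ mtu ≤ 27) ∧
  ¬ (mtu ≤ 19 ∧ total_length - 20 < (PySem.Int.floordiv (mtu - 20) 8) * 8)
instance (total_length : Int) (mtu : Int) : Decidable (Pre_calculate_ip_fragmentation total_length mtu) := by unfold Pre_calculate_ip_fragmentation; infer_instance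

def pvWitness_calculate_ip_fragmentation : Int × Int := (100, 48)

def Spec_calculate_ip_fragmentation (total_length : Int) (mtu : Int) (out : List (List (String × Int))) : Prop := out = calculate_ip_fragmentation_alt total_length mtu
instance (total_length : Int) (mtu : Int) (out : List (List (String × Int))) : Decidable (Spec_calculate_ip_fragmentation total_length mtu out) := by unfold Spec_calculate_ip_fragmentation; infer_instance

-- ===== CLAIM (what is proved, stated in full; the proofs are below) =====
def Claim_equal_calculate_ip_fragmentation : Prop := ∀ (total_length : Int) (mtu : Int), Dom_calculate_ip_fragmentation total_length mtu → Pre_calculate_ip_fragmentation total_length mtu → Spec_calculate_ip_fragmentation total_length mtu (calculate_ip_fragmentation total_length mtu)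

-- ===== LEMMAS AND PROOFS =====

-- The fragment at 0-based index i, closed form (m = aligned capacity, ods = data
-- size, n = fragment count); both loops are related to this form.
def pvFrag (m ods n i : Int) : List (String × Int) :=
  let data_size := min m (ods - i * m)
  [("fragment_number", i + 1), ("length", 20 + data_size),
   ("id", (12345 : Int)), ("fragflag", if i < n - 1 then (1 : Int) else 0),
   ("offset", PySem.Int.floordiv (i * m) 8), ("data_size", data_size)]

-- One step of A's fold.
def pvStepA (m n : Int) (st : List (List (String × Int)) × Int × Int) (i : Int) :
    List (List (String × Int)) × Int × Int :=
  let fragments := st.1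
  let remaining_data := st.2.1
  let offset := st.2.2
  let is_last_fragment := i == n - 1
  let data_size := min m remaining_data
  let fragment_length := (20 : Int) + data_size
  let frag_flag : Int := if is_last_fragment then 0 else 1
  let frag_offset := PySem.Int.floordiv offset 8
  (fragments ++ [[("fragment_number", i + 1), ("length", fragment_length),
                  ("id", (12345 : Int)), ("fragflag", frag_flag),
                  ("offset", frag_offset), ("data_size", data_size)]],
   remaining_data - data_size, offset + data_size)

-- A-side loop invariant: if every non-last fragment is full (hypothesis H), then
-- entering iteration i the remaining data is ods - i*m and the offset is i*m, and
-- A's fold appends exactly the closed-form fragments for indices i..n-1.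
lemma pvLoopA_eq (m ods n : Int)
    (H : ∀ i : Int, 0 ≤ i → i < n - 1 → m ≤ ods - i * m) :
    ∀ (j : Nat) (i : Int) (acc : List (List (String × Int))), i = n - j → 0 ≤ i →
      ((PySem.List.pyRange i n 1).foldl (pvStepA m n) (acc, ods - i * m, i * m)).1
        = acc ++ (PySem.List.pyRange i n 1).map (pvFrag m ods n) := by
  intro j
  induction j with
  | zero =>
    intro i acc hi _
    have hni : n ≤ i := by omega
    rw [PySem.List.pyRange_one_eq_nil hni]
    simp
  | succ k ih =>
    intro i acc hi hi0
    have hilt : i < n := by omega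
    rw [PySem.List.pyRange_one_cons hilt]
    by_cases hlast : i = n - 1
    · subst hlast
      have htail : PySem.List.pyRange (n - 1 + 1) n 1 = [] := by
        apply PySem.List.pyRange_one_eq_nil; omega
      simp only [List.foldl_cons, htail, List.foldl_nil, List.map_cons, List.map_nil]
      simp [pvStepA, pvFrag]
    · have hlt1 : i < n - 1 := by omega
      have hmin : min m (ods - i * m) = m := min_eq_left (H i hi0 hlt1)
      simp only [List.foldl_cons, List.map_cons]
      have hstep : pvStepA m n (acc, ods - i * m, i * m) i
          = (acc ++ [pvFrag m ods n i], ods - (i + 1) * m, (i + 1) * m) := by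
        simp only [pvStepA, pvFrag]
        have hbeq : (i == n - 1) = false := by simp [hlast]
        simp [hbeq, hmin, hlt1]
        constructor
        · ring
        · ring
      rw [hstep, ih (i + 1) (acc ++ [pvFrag m ods n i]) (by omega) (by omega)]
      simp

-- B-side loop invariant: entering an iteration with number = i (0 ≤ i ≤ n),
-- start = i*m and the fragments i..n-1 already built, the countdown prepends the
-- closed-form fragments for indices 0..i-1.
lemma pvBuildB_eq (m ods n : Int) :
    ∀ (k : Nat) (i : Int), i = (k : Int) → i ≤ n →
      pvBuildB m ods k (i * m) i ((PySem.List.pyRange i n 1).map (pvFrag m ods n))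
        = (PySem.List.pyRange 0 n 1).map (pvFrag m ods n) := by
  intro k
  induction k with
  | zero =>
    intro i hi _
    simp only [Nat.cast_zero] at hi
    subst hi
    rfl
  | succ t ih =>
    intro i hi hin
    have hipos : 0 < i := by omega
    have e1 : i * m - m = (i - 1) * m := by ring
    have e2 : i - 1 + 1 = i := by ring
    have hflag : (if ((PySem.List.pyRange i n 1).map (pvFrag m ods n)).isEmpty then (0 : Int) else 1)
        = (if i - 1 < n - 1 then (1 : Int) else 0) := by
      by_cases hlt : i < n
      · have h1 : PySem.List.pyRange i n 1 = i :: PySem.List.pyRange (i + 1) n 1 :=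
          PySem.List.pyRange_one_cons hlt
        rw [h1]
        rw [if_pos (by omega : i - 1 < n - 1)]
        rfl
      · have h1 : PySem.List.pyRange i n 1 = [] :=
          PySem.List.pyRange_one_eq_nil (by omega)
        rw [h1]
        rw [if_neg (by omega : ¬ i - 1 < n - 1)]
        rfl
    have hconsmap : (PySem.List.pyRange (i - 1) n 1).map (pvFrag m ods n)
        = pvFrag m ods n (i - 1) :: (PySem.List.pyRange i n 1).map (pvFrag m ods n) := by
      have hc := PySem.List.pyRange_one_cons (show i - 1 < n by omega)
      rw [e2] at hc
      rw [hc, List.map_cons]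
    simp only [pvBuildB, if_pos hipos]
    rw [e1]
    have hfr : ([(("fragment_number", i) : String × Int), ("length", 20 + min m (ods - (i - 1) * m)),
          ("id", (12345 : Int)),
          ("fragflag", if ((PySem.List.pyRange i n 1).map (pvFrag m ods n)).isEmpty then (0 : Int) else 1),
          ("offset", PySem.Int.floordiv ((i - 1) * m) 8), ("data_size", min m (ods - (i - 1) * m))])
        = pvFrag m ods n (i - 1) := by
      rw [hflag]
      simp only [pvFrag, e2]
    rw [hfr, ← hconsmap]
    exact ih (i - 1) (by omega) (by omega)

-- Bracket both sides of a positive floor division.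
lemma pvBounds_of_pos {x m n : Int} (hm : 0 < m) (hn : PySem.Int.floordiv x m = n) :
    n * m ≤ x ∧ x < (n + 1) * m :=
  (PySem.Int.floordiv_eq_iff_of_pos hm).mp hn

-- ===== VERDICT (by name: the statement is the Claim_ definition above) =====
theorem calculate_ip_fragmentation_spec : Claim_equal_calculate_ip_fragmentation := by
  intro total_length mtu _ hpre
  obtain ⟨hx, hy⟩ := hpre
  unfold Spec_calculate_ip_fragmentation
  set m := (PySem.Int.floordiv (mtu - 20) 8) * 8 with hmdef
  set ods := total_length - 20 with hodsdef
  set n := PySem.Int.floordiv (ods + m - 1) m with hndef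
  have hAeq : calculate_ip_fragmentation total_length mtu
      = ((PySem.List.pyRange 0 n 1).foldl (pvStepA m n) ([], ods, 0)).1 := rfl
  have hBeq : calculate_ip_fragmentation_alt total_length mtu
      = pvBuildB m ods n.toNat (n * m) n [] := rfl
  have hBmap : calculate_ip_fragmentation_alt total_length mtu
      = (PySem.List.pyRange 0 n 1).map (pvFrag m ods n) := by
    rw [hBeq]
    by_cases hn : 0 < n
    · have h0 := pvBuildB_eq m ods n n.toNat n (by omega) le_rfl
      rw [PySem.List.pyRange_one_eq_nil (le_refl n), List.map_nil] at h0
      exact h0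
    · have ht : n.toNat = 0 := by omega
      rw [ht, PySem.List.pyRange_one_eq_nil (by omega : n ≤ 0)]
      rfl
  rw [hAeq, hBmap]
  have hmain : (∀ i : Int, 0 ≤ i → i < n - 1 → m ≤ ods - i * m) →
      ((PySem.List.pyRange 0 n 1).foldl (pvStepA m n) ([], ods, 0)).1
        = (PySem.List.pyRange 0 n 1).map (pvFrag m ods n) := by
    intro H
    by_cases hn0 : n ≤ 0
    · rw [PySem.List.pyRange_one_eq_nil hn0]
      simp
    · have hloop := pvLoopA_eq m ods n H n.toNat 0 [] (by omega) le_rfl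
      simpa using hloop
  by_cases hmtu : 28 ≤ mtu
  · -- payload capacity positive: every non-last fragment is full by the ceiling bound
    have hq : 1 ≤ PySem.Int.floordiv (mtu - 20) 8 := by
      rw [PySem.Int.le_floordiv_iff_mul_le (by norm_num)]; omega
    have hm : 0 < m := by
      have h8 := mul_le_mul_of_nonneg_right hq (by norm_num : (0:Int) ≤ 8)
      rw [hmdef]; omega
    obtain ⟨h1, h2⟩ := pvBounds_of_pos hm hndef.symm
    apply hmain
    intro i hi0 hilt
    have hmul : (i + 1) * m ≤ (n - 1) * m :=
      mul_le_mul_of_nonneg_right (by omega) hm.le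
    have e1 : (i + 1) * m = i * m + m := by ring
    have e2 : (n - 1) * m = n * m - m := by ring
    omega
  · -- mtu ≤ 19 (Pre_ rules out 20..27): capacity negative but ods ≥ m, so every
    -- fragment is full of (negative) capacity and the two closed forms coincide
    have hmtu' : mtu ≤ 19 := by omega
    have hods : m ≤ ods := by omega
    have hqneg : PySem.Int.floordiv (mtu - 20) 8 ≤ -1 := by
      have h0 : PySem.Int.floordiv (mtu - 20) 8 < 0 := by
        rw [PySem.Int.floordiv_lt_iff_lt_mul (by norm_num)]; omega
      omega
    have hmneg : m ≤ -8 := by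
      have h8 := mul_le_mul_of_nonneg_right hqneg (by norm_num : (0:Int) ≤ 8)
      rw [hmdef]; omega
    apply hmain
    intro i hi0 _
    have hnn : 0 ≤ i * (-m) := mul_nonneg hi0 (by omega)
    have e : i * (-m) = -(i * m) := by ring
    omega
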